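-- pv_equiv track=rewrite | github.com/PastyPurpleTrolls/game-contest-server | examples/checkers/test-players/player3.py | longjump
-- ===== SOURCE A (Python) =====
-- def longjump(v):
--     l = []
--     long = []
--     for jump in v:
--         l.append(len(jump))
--     mx = max(l)
--     if mx <= 5:
--         return v
--     ct = l.count(mx)
--     idx = 0
--     for i in range(ct):
--         long.append(v[l.index(mx, idx)])
--         idx = (l.index(mx, idx)) + 1
--     return long
-- ===== SOURCE B (Python) =====
-- def longjump(v):
--     best = 0
--     result = []
--     for jump in v:
--         L = len(jump)
--         if L > best:
--             best = L
--             result = [jump]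
--         elif L == best:
--             result.append(jump)
--     return v if best <= 5 else result
-- ===== Notes on version B (the rewrite author's own statement) =====
-- stated objective: simpler
-- what changed: B replaces A's four phases (build a lengths list, max(), count(), then a repeated list.index walk) by one linear pass that keeps a running maximum length and resets/extends the result list.
-- crash fix: On the empty list A raises ValueError (max of empty sequence) while B returns the empty list. — e.g. on longjump([]): A raises ValueError, B returns []
import Mathlib
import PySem

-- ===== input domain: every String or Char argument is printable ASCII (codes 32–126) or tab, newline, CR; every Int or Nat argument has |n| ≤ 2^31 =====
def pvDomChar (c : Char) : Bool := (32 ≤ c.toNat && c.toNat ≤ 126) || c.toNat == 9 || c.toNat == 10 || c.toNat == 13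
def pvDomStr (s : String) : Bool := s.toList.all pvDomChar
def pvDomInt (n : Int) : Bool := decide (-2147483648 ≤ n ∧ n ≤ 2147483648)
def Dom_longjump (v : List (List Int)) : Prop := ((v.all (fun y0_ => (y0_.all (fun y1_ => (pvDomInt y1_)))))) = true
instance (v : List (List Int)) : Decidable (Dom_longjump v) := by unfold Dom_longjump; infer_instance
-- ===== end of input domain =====

-- B replaces A's four phases (lengths list, max, count, repeated index-walk) by one linear
-- pass keeping a running maximum and a reset/extend result list; same cost, simpler code.

-- ===== PORT A =====
-- l.index(mx, idx) with a nonnegative start: exact for start ≥ 0, which holds throughout A's loop.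
def pyIndexFrom (l : List Int) (x : Int) (s : Nat) : Option Nat :=
  (PySem.List.index? (l.drop s) x).map (· + s)

def longjump (v : List (List Int)) : List (List Int) :=
  let l := v.foldl (fun acc jump => acc ++ [(jump.length : Int)]) []
  match PySem.List.max? l (fun x => x) with
  | none => []   -- max([]) raises ValueError: excluded by Pre_longjump
  | some mx =>
    if mx ≤ 5 then v
    else
      let ct := PySem.List.count l mx
      let st := (PySem.List.pyRange 0 (ct : Int) 1).foldl
        (fun (st : List (List Int) × Nat) _ =>
          match pyIndexFrom l mx st.2 with
          | some i => (st.1 ++ [(PySem.List.pyGet? v (i : Int)).getD []], i + 1)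
          | none => st)   -- ValueError from l.index: unreachable, count guarantees an occurrence
        ([], 0)
      st.1

-- ===== PORT B =====
def longjump_alt (v : List (List Int)) : List (List Int) :=
  let st := v.foldl
    (fun (st : Int × List (List Int)) jump =>
      let L : Int := jump.length
      if L > st.1 then (L, [jump])
      else if L = st.1 then (st.1, st.2 ++ [jump])
      else st)
    (0, [])
  if st.1 ≤ 5 then v else st.2

-- ===== PRECONDITION & SPEC =====
-- Pre_ excludes only the empty list, on which A's max([]) raises ValueError.
def Pre_longjump (v : List (List Int)) : Prop := v ≠ []
instance (v : List (List Int)) : Decidable (Pre_longjump v) := by unfold Pre_longjump; infer_instance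
def pvWitness_longjump : List (List Int) := [[1, 2, 3], []]

-- On the empty list A raises ValueError (max of empty sequence) while B returns the empty list.
def Raises_longjump (v : List (List Int)) : Prop := v = []
instance (v : List (List Int)) : Decidable (Raises_longjump v) := by unfold Raises_longjump; infer_instance
def pvRaiseWitness_longjump : List (List Int) := []
def pvRaiseWitnessOut_longjump : List (List Int) := []

def Spec_longjump (v : List (List Int)) (out : List (List Int)) : Prop := out = longjump_alt v
instance (v : List (List Int)) (out : List (List Int)) : Decidable (Spec_longjump v out) := by unfold Spec_longjump; infer_instance

-- ===== CLAIM (what is proved, stated in full; the proofs are below) =====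
def Claim_equal_longjump : Prop := ∀ (v : List (List Int)), Dom_longjump v → Pre_longjump v → Spec_longjump v (longjump v)
def Claim_raises_longjump : Prop := (∀ (v : List (List Int)), Dom_longjump v → Raises_longjump v → ¬ Pre_longjump v) ∧ (Dom_longjump (pvRaiseWitness_longjump) ∧ Raises_longjump (pvRaiseWitness_longjump) ∧ longjump_alt (pvRaiseWitness_longjump) = pvRaiseWitnessOut_longjump)

-- ===== LEMMAS AND PROOFS =====

-- B's loop computes the running maximum together with the max-length jumps (in order).
theorem bloop (v : List (List Int)) (b : Int) (r : List (List Int)) :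
    v.foldl
      (fun (st : Int × List (List Int)) jump =>
        let L : Int := jump.length
        if L > st.1 then (L, [jump])
        else if L = st.1 then (st.1, st.2 ++ [jump])
        else st) (b, r)
    = (v.foldl (fun a j => max a (j.length : Int)) b,
       (if b = v.foldl (fun a j => max a (j.length : Int)) b then r else [])
         ++ v.filter (fun j => (j.length : Int) == v.foldl (fun a j => max a (j.length : Int)) b)) := by
  induction v generalizing b r with
  | nil => simp
  | cons j t ih =>
    rcases lt_trichotomy b ((j.length : Int)) with hgt | heq | hlt
    · -- L > b : reset
      have hmax : max b ((j.length : Int)) = (j.length : Int) := by omega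
      simp only [List.foldl_cons, hmax, List.filter_cons]
      rw [if_pos (show (j.length : Int) > b from hgt), ih]
      have hLle := (PySem.List.le_foldl_max_int t (fun j => (j.length : Int)) ((j.length : Int))).1
      have hne : ¬ b = t.foldl (fun a j => max a (j.length : Int)) ((j.length : Int)) := by omega
      rw [if_neg hne]
      by_cases hj : ((j.length : Int)) = t.foldl (fun a j => max a (j.length : Int)) ((j.length : Int))
      · rw [if_pos hj, if_pos (beq_iff_eq.mpr hj)]
        simp
      · rw [if_neg hj, if_neg (by simpa using hj)]
    · -- L = b : append
      have hmax : max b ((j.length : Int)) = b := by omega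
      simp only [List.foldl_cons, hmax, List.filter_cons]
      rw [if_neg (by omega), if_pos heq.symm, ih]
      by_cases hb : b = t.foldl (fun a j => max a (j.length : Int)) b
      · rw [if_pos hb, if_pos hb, if_pos (by simp [← heq, ← hb])]
        simp
      · rw [if_neg hb, if_neg hb, if_neg (by simp [← heq]; exact hb)]
    · -- L < b : skip
      have hmax : max b ((j.length : Int)) = b := by omega
      have hble := (PySem.List.le_foldl_max_int t (fun j => (j.length : Int)) b).1
      simp only [List.foldl_cons, hmax, List.filter_cons]
      rw [if_neg (by omega), if_neg (by omega), ih]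
      rw [if_neg (show ¬ (((j.length:Int) == t.foldl (fun a j => max a (j.length : Int)) b) = true) by simp; omega)]

-- A's inner loop, named: one step of the index-walk.
def stepA (v : List (List Int)) (l : List Int) (mx : Int)
    (st : List (List Int) × Nat) : List (List Int) × Nat :=
  match pyIndexFrom l mx st.2 with
  | some i => (st.1 ++ [(PySem.List.pyGet? v (i : Int)).getD []], i + 1)
  | none => st

-- a foldl whose function ignores the list element is an iterate
theorem foldl_ignore {α σ : Type} (f : σ → σ) :
    ∀ (li : List α) (init : σ), li.foldl (fun s _ => f s) init = f^[li.length] init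
  | [], _ => rfl
  | _ :: t, init => by
      simp [List.foldl_cons, foldl_ignore f t, Function.iterate_succ_apply]

-- A's index-walk, iterated count-many times, collects exactly the jumps of length mx in order.
theorem awalk (v : List (List Int)) (mx : Int) :
    ∀ (k s : Nat) (acc : List (List Int)),
      ((v.map (fun j => (j.length : Int))).drop s).count mx = k →
      ((stepA v (v.map (fun j => (j.length : Int))) mx)^[k] (acc, s)).1
        = acc ++ (v.drop s).filter (fun j => (j.length : Int) == mx) := by
  intro k
  induction k with
  | zero =>
    intro s acc hc
    have hnm : mx ∉ (v.map (fun j => (j.length : Int))).drop s :=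
      List.count_eq_zero.mp hc
    have : (v.drop s).filter (fun j => (j.length : Int) == mx) = [] := by
      rw [List.filter_eq_nil_iff]
      intro x hx
      simp only [beq_iff_eq]
      intro hxe
      exact hnm (by rw [← List.map_drop]; exact hxe ▸ List.mem_map_of_mem hx)
    simp [this]
  | succ k ih =>
    intro s acc hc
    set l := v.map (fun j => (j.length : Int)) with hl
    have hmem : mx ∈ l.drop s := by
      apply List.count_pos_iff.mp; omega
    obtain ⟨j, hjidx⟩ : ∃ j, PySem.List.index? (l.drop s) mx = some j := by
      rcases Option.isSome_iff_exists.mp (Iff.mpr (PySem.List.index?_isSome_iff _ _) hmem) with ⟨j, hj⟩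
      exact ⟨j, hj⟩
    obtain ⟨pre, suf, hdecomp, hplen, hnpre⟩ := Iff.mp (PySem.List.index?_eq_some_iff _ _ _) hjidx
    -- basic length facts
    have hld : l.drop s = (v.drop s).map (fun j => (j.length : Int)) := by
      rw [hl, List.map_drop]
    have hjlt : j < (v.drop s).length := by
      have : (l.drop s).length = (v.drop s).length := by rw [hld]; simp
      have h2 : j < (l.drop s).length := by
        rw [hdecomp, ← hplen]; simp
      omega
    have hslt : s < v.length := by
      have := List.length_drop (l := v) (i := s) ▸ hjlt
      omega
    have hilt : j + s < v.length := by
      have : (v.drop s).length = v.length - s := by simp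
      omega
    -- decompose v.drop s = T ++ w :: R
    set T := (v.drop s).take j with hT
    set R := (v.drop s).drop (j + 1) with hR
    have hw : v.drop s = T ++ (v.drop s)[j] :: R := by
      rw [hT, hR]
      conv_lhs => rw [← List.take_append_drop j (v.drop s)]
      congr 1
      exact (List.getElem_cons_drop (h := hjlt)).symm
    have hmapT : T.map (fun j => (j.length : Int)) = pre := by
      rw [hT, List.map_take, ← hld, hdecomp, ← hplen, List.take_left]
    have hwlen : ((((v.drop s)[j]'hjlt).length : Int)) = mx := by
      obtain ⟨hk, hval, -⟩ := PySem.List.getElem_of_index?_eq_some hjidx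
      have hopt : (l.drop s)[j]? = some mx := by
        rw [List.getElem?_eq_getElem hk, hval]
      rw [hld, List.getElem?_map, List.getElem?_eq_getElem hjlt] at hopt
      simpa using hopt
    -- the step computation
    have hstep : stepA v l mx (acc, s) = (acc ++ [v[j + s]'hilt], j + s + 1) := by
      simp only [stepA, pyIndexFrom, hjidx, Option.map_some]
      have : PySem.List.pyGet? v ((j + s : Nat) : Int) = some (v[j + s]'hilt) := by
        rw [PySem.List.pyGet?_natCast]
        simp [List.getElem?_eq_getElem hilt]
      rw [Nat.cast_add] at this
      simp [this]
    -- drop past the found occurrence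
    have hsuf : l.drop (j + s + 1) = suf := by
      have h1 : l.drop (j + s + 1) = (l.drop s).drop (j + 1) := by
        rw [List.drop_drop]; congr 1; omega
      have h2 : (pre ++ [mx]).length = j + 1 := by simp [hplen]
      rw [h1, hdecomp, show pre ++ mx :: suf = (pre ++ [mx]) ++ suf by simp,
          List.drop_left' h2]
    have hcount : (l.drop (j + s + 1)).count mx = k := by
      have hc' := hc
      rw [hdecomp, List.count_append, List.count_cons] at hc'
      have hpre0 : pre.count mx = 0 := List.count_eq_zero.mpr hnpre
      rw [hsuf]
      simp [hpre0] at hc'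
      omega
    have hRdrop : v.drop (j + s + 1) = R := by
      rw [hR, List.drop_drop]; congr 1; omega
    -- filter decomposition
    have hTnil : T.filter (fun j => ((j.length : Int) == mx)) = [] := by
      rw [List.filter_eq_nil_iff]
      intro x hx
      have hxp : ((x.length : Int)) ∈ pre := hmapT ▸ List.mem_map_of_mem hx
      simp only [beq_iff_eq]
      intro he
      rw [he] at hxp
      exact hnpre hxp
    have hfilter : (v.drop s).filter (fun j => ((j.length : Int) == mx))
        = (v.drop s)[j]'hjlt :: R.filter (fun j => ((j.length : Int) == mx)) := by
      conv_lhs => rw [hw]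
      rw [List.filter_append, hTnil, List.filter_cons, if_pos (beq_iff_eq.mpr hwlen)]
      simp
    have hgetd : v[j + s]'hilt = (v.drop s)[j]'hjlt := by
      rw [List.getElem_drop]
      congr 1
      omega
    rw [Function.iterate_succ_apply, hstep, ih _ _ hcount, hRdrop, hfilter, hgetd]
    simp

theorem longjump_eq (w : List Int) (t : List (List Int)) :
    longjump (w :: t) = longjump_alt (w :: t) := by
  have hl : (w :: t).foldl (fun acc jump => acc ++ [(jump.length : Int)]) []
      = (w :: t).map (fun j => (j.length : Int)) := by
    simpa using PySem.List.foldl_append_singleton_eq_map (l := w :: t) (f := fun j : List Int => (j.length : Int))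
  have hmax? : PySem.List.max? ((w :: t).map (fun j => (j.length : Int))) (fun x => x)
      = some ((t.map (fun j => (j.length : Int))).foldl max ((w.length : Int))) := by
    rw [List.map_cons]
    exact PySem.List.max?_id_cons _ _
  set m := (t.map (fun j => (j.length : Int))).foldl max ((w.length : Int)) with hm
  have hM0 : (w :: t).foldl (fun a j => max a (j.length : Int)) 0 = m := by
    rw [← List.foldl_map]
    rw [List.map_cons, List.foldl_cons]
    have : max (0 : Int) ((w.length : Int)) = (w.length : Int) := by
      have : (0 : Int) ≤ (w.length : Int) := Int.natCast_nonneg _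
      omega
    rw [this]
  simp only [longjump, longjump_alt, hl, hmax?, bloop, hM0]
  by_cases h5 : m ≤ 5
  · simp [h5]
  · rw [if_neg h5, if_neg h5]
    have hct : ((w :: t).map (fun j => (j.length : Int))).count m
        = PySem.List.count ((w :: t).map (fun j => (j.length : Int))) m := by
      rw [PySem.List.count_eq]
    have hiter := foldl_ignore (stepA (w :: t) ((w :: t).map (fun j => (j.length : Int))) m)
      (PySem.List.pyRange 0 ((PySem.List.count ((w :: t).map (fun j => (j.length : Int))) m : Nat) : Int) 1)
      (([], 0))
    have hlen : (PySem.List.pyRange 0 ((PySem.List.count ((w :: t).map (fun j => (j.length : Int))) m : Nat) : Int) 1).length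
        = PySem.List.count ((w :: t).map (fun j => (j.length : Int))) m := by
      rw [PySem.List.length_pyRange_one]
      omega
    rw [hlen] at hiter
    have hA := awalk (w :: t) m (PySem.List.count ((w :: t).map (fun j => (j.length : Int))) m) 0 []
      (by rw [List.drop_zero, PySem.List.count_eq])
    calc ((PySem.List.pyRange 0 ((PySem.List.count ((w :: t).map (fun j => (j.length : Int))) m : Nat) : Int) 1).foldl
            (fun st _ => stepA (w :: t) ((w :: t).map (fun j => (j.length : Int))) m st) ([], 0)).1
        = ((stepA (w :: t) ((w :: t).map (fun j => (j.length : Int))) m)^[PySem.List.count ((w :: t).map (fun j => (j.length : Int))) m] ([], 0)).1 := by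
          rw [hiter]
      _ = [] ++ ((w :: t).drop 0).filter (fun j => (j.length : Int) == m) := hA
      _ = (if (0 : Int) = m then ([] : List (List Int)) else [])
            ++ (w :: t).filter (fun j => (j.length : Int) == m) := by
          by_cases h0 : (0 : Int) = m <;> simp [h0]

-- ===== VERDICT (by name: the statement is the Claim_ definition above) =====
theorem longjump_spec : Claim_equal_longjump := by
  intro v _ hpre
  unfold Spec_longjump
  obtain ⟨w, t, rfl⟩ := List.exists_cons_of_ne_nil hpre
  exact longjump_eq w t

@[simp] theorem longjump_raises : Claim_raises_longjump := by
  unfold Claim_raises_longjump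
  exact ⟨fun v _ h hp => hp h, by decide⟩
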